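-- pv_equiv track=rewrite | github.com/pypi-data/pypi-mirror-391 | packages/chunkformer/chunkformer-1.2.2-py3-none-any.whl/chunkformer/utils/model_utils.py | remove_duplicates_and_blank
-- ===== SOURCE A (Python) =====
-- from typing import List, Tuple
--
-- def remove_duplicates_and_blank(hyp: List[int], blank_id: int = 0) -> List[int]:
--     new_hyp: List[int] = []
--     cur = 0
--     while cur < len(hyp):
--         if hyp[cur] != blank_id:
--             new_hyp.append(hyp[cur])
--         prev = cur
--         while cur < len(hyp) and hyp[cur] == hyp[prev]:
--             cur += 1
--     return new_hyp
-- ===== SOURCE B (Python) =====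
-- def remove_duplicates_and_blank(hyp, blank_id=0):
--     new_hyp = []
--     prev = None
--     for t in hyp:
--         if t != prev and t != blank_id:
--             new_hyp.append(t)
--         prev = t
--     return new_hyp
-- ===== Notes on version B (the rewrite author's own statement) =====
-- stated objective: simpler
-- what changed: Replaced A's index-driven outer loop with an inner run-skipping while-loop by a single flat for-loop over the tokens that carries the previously seen token (sentinel None) and appends a token exactly when it differs from the previous one and is not blank; the flat iteration avoids per-element indexing, a constant-factor win.
import Mathlib
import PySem

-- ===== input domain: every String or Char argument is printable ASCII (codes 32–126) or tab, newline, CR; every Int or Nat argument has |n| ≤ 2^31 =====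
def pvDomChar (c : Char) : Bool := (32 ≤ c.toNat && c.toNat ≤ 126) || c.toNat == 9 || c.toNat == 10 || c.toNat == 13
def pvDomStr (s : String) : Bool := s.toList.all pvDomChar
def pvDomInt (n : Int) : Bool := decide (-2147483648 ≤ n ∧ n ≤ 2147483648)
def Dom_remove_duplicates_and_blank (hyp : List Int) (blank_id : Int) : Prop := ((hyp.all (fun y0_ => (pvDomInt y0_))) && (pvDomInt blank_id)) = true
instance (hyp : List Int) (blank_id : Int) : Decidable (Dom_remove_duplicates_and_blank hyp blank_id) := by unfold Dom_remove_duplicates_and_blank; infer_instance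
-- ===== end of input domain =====

-- B replaces A's inner run-skipping while-loop by one flat pass carrying the previous token (objective: simpler).
-- ===== PORT A =====
-- inner 'while cur < len(hyp) and hyp[cur] == hyp[prev]' loop (v = hyp[prev])
def pvSkipRun (hyp : List Int) (v : Int) (cur : Nat) : Nat :=
  if _h : cur < hyp.length ∧ hyp.getD cur 0 = v then pvSkipRun hyp v (cur + 1) else cur
termination_by hyp.length - cur

theorem pvSkipRun_ge (hyp : List Int) (v : Int) (cur : Nat) : cur ≤ pvSkipRun hyp v cur := by
  unfold pvSkipRun
  split
  · exact le_trans (Nat.le_succ cur) (pvSkipRun_ge hyp v (cur + 1))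
  · exact le_refl cur
termination_by hyp.length - cur

-- outer while loop of A
def pvALoop (hyp : List Int) (blank_id : Int) (cur : Nat) (acc : List Int) : List Int :=
  if h : cur < hyp.length then
    pvALoop hyp blank_id (pvSkipRun hyp (hyp.getD cur 0) cur)
      (if hyp.getD cur 0 ≠ blank_id then acc ++ [hyp.getD cur 0] else acc)
  else acc
termination_by hyp.length - cur
decreasing_by
  have h1 : pvSkipRun hyp (hyp.getD cur 0) cur = pvSkipRun hyp (hyp.getD cur 0) (cur + 1) := by
    rw [pvSkipRun]; simp [h]
  have h2 := pvSkipRun_ge hyp (hyp.getD cur 0) (cur + 1)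
  omega

def remove_duplicates_and_blank (hyp : List Int) (blank_id : Int) : List Int :=
  pvALoop hyp blank_id 0 []

-- ===== PORT B =====
def remove_duplicates_and_blank_alt (hyp : List Int) (blank_id : Int) : List Int :=
  (hyp.foldl
    (fun (st : List Int × Option Int) t =>
      if st.2 ≠ some t ∧ t ≠ blank_id then (st.1 ++ [t], some t) else (st.1, some t))
    ([], none)).1

-- ===== PRECONDITION & SPEC =====
def Spec_remove_duplicates_and_blank (hyp : List Int) (blank_id : Int) (out : List Int) : Prop := out = remove_duplicates_and_blank_alt hyp blank_id
instance (hyp : List Int) (blank_id : Int) (out : List Int) : Decidable (Spec_remove_duplicates_and_blank hyp blank_id out) := by unfold Spec_remove_duplicates_and_blank; infer_instance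

-- ===== CLAIM (what is proved, stated in full; the proofs are below) =====
def Claim_equal_remove_duplicates_and_blank : Prop := ∀ (hyp : List Int) (blank_id : Int), Dom_remove_duplicates_and_blank hyp blank_id → Spec_remove_duplicates_and_blank hyp blank_id (remove_duplicates_and_blank hyp blank_id)

-- ===== LEMMAS AND PROOFS =====

-- canonical structural recursion both ports are reduced to
def pvCanon (blank_id : Int) : List Int → Option Int → List Int
  | [], _ => []
  | t :: rest, prev =>
      if prev ≠ some t ∧ t ≠ blank_id then t :: pvCanon blank_id rest (some t)
      else pvCanon blank_id rest (some t)

theorem pvAlt_foldl_eq (blank_id : Int) (l : List Int) (acc : List Int) (prev : Option Int) :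
    (l.foldl
      (fun (st : List Int × Option Int) t =>
        if st.2 ≠ some t ∧ t ≠ blank_id then (st.1 ++ [t], some t) else (st.1, some t))
      (acc, prev)).1 = acc ++ pvCanon blank_id l prev := by
  induction l generalizing acc prev with
  | nil => simp [pvCanon]
  | cons t rest ih =>
    simp only [List.foldl_cons, pvCanon]
    by_cases h : prev ≠ some t ∧ t ≠ blank_id
    · simp [h, ih]
    · simp [h, ih]

theorem pvSkipRun_stop (hyp : List Int) (v : Int) (cur : Nat) :
    ¬ (pvSkipRun hyp v cur < hyp.length ∧ hyp.getD (pvSkipRun hyp v cur) 0 = v) := by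
  unfold pvSkipRun
  split
  · exact pvSkipRun_stop hyp v (cur + 1)
  · assumption
termination_by hyp.length - cur

theorem pvCanon_skip (blank_id : Int) (hyp : List Int) (v : Int) (cur : Nat) :
    pvCanon blank_id (hyp.drop cur) (some v) =
      pvCanon blank_id (hyp.drop (pvSkipRun hyp v cur)) (some v) := by
  rw [pvSkipRun]
  split
  · rename_i h
    have hdrop : hyp.drop cur = hyp.getD cur 0 :: hyp.drop (cur + 1) := by
      rw [List.getD_eq_getElem hyp 0 h.1, List.drop_eq_getElem_cons h.1]
    rw [hdrop, h.2, pvCanon]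
    simp only [ne_eq, not_true_eq_false, false_and, if_false]
    exact pvCanon_skip blank_id hyp v (cur + 1)
  · rfl
termination_by hyp.length - cur

theorem pvALoop_eq (hyp : List Int) (blank_id : Int) (cur : Nat) (acc : List Int)
    (prev : Option Int)
    (hok : ∀ p, prev = some p → cur < hyp.length → hyp.getD cur 0 ≠ p) :
    pvALoop hyp blank_id cur acc = acc ++ pvCanon blank_id (hyp.drop cur) prev := by
  by_cases h : cur < hyp.length
  · rw [pvALoop, dif_pos h]
    have hdrop : hyp.drop cur = hyp.getD cur 0 :: hyp.drop (cur + 1) := by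
      rw [List.getD_eq_getElem hyp 0 h, List.drop_eq_getElem_cons h]
    have hpt : prev ≠ some (hyp.getD cur 0) := fun he => hok _ he h rfl
    have hskip : pvSkipRun hyp (hyp.getD cur 0) cur = pvSkipRun hyp (hyp.getD cur 0) (cur + 1) := by
      rw [pvSkipRun]; simp [h]
    have hrec := pvALoop_eq hyp blank_id (pvSkipRun hyp (hyp.getD cur 0) cur)
      (if hyp.getD cur 0 ≠ blank_id then acc ++ [hyp.getD cur 0] else acc)
      (some (hyp.getD cur 0))
      (by
        intro p hp hlt
        cases hp
        intro he
        exact pvSkipRun_stop hyp (hyp.getD cur 0) cur ⟨hlt, he⟩)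
    rw [hrec, hdrop, pvCanon, hskip, ← pvCanon_skip]
    generalize hg : hyp.getD cur 0 = t at hpt ⊢
    by_cases hb : t = blank_id
    · simp [hb, hpt]
    · simp [hb, hpt]
  · rw [pvALoop, dif_neg h]
    have : hyp.drop cur = [] := List.drop_eq_nil_of_le (by omega)
    simp [this, pvCanon]
termination_by hyp.length - cur
decreasing_by
  have h1 : pvSkipRun hyp (hyp.getD cur 0) cur = pvSkipRun hyp (hyp.getD cur 0) (cur + 1) := by
    rw [pvSkipRun]; simp [h]
  have h2 := pvSkipRun_ge hyp (hyp.getD cur 0) (cur + 1)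
  omega

-- ===== VERDICT (by name: the statement is the Claim_ definition above) =====
theorem remove_duplicates_and_blank_spec : Claim_equal_remove_duplicates_and_blank := by
  intro hyp blank_id _
  unfold Spec_remove_duplicates_and_blank remove_duplicates_and_blank remove_duplicates_and_blank_alt
  rw [pvAlt_foldl_eq, pvALoop_eq hyp blank_id 0 [] none (by simp)]
  simp
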